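-- pv_equiv track=rewrite | github.com/robison/capirca | tools/check_cisco_acl.py | contiguous_bits
-- ===== SOURCE A (Python) =====
-- def is_bit_on(number, bit, masklen):
--     """
--     Returns true if the nth position bit (prefix length style) is on
--     in number
--     """
--     return (number & (1 << (masklen - bit))) != 0
--
-- def contiguous_bits(mask, masklen):
--     """
--     Return an array of range tuples (start, end) of groups of on bits in
--     the discontiguous mask
--     """
--     ranges = []
--     start, end = (None, None)
--     for bit in range(1, masklen + 1):
--         if is_bit_on(mask, bit, masklen):
--             if start:
--                 end = bit
--             else:
--                 start = bit
--                 end = bit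
--         elif end:
--             ranges.append((start, end))
--             start, end = (None, None)
--     if end:
--         ranges.append((start, end))
--     return ranges
-- ===== SOURCE B (Python) =====
-- def contiguous_bits(mask, masklen):
--     """
--     Return an array of range tuples (start, end) of groups of on bits in
--     the discontiguous mask
--     """
--     bits = [mask & (1 << (masklen - p)) != 0 for p in range(1, masklen + 1)]
--     n = len(bits)
--     ranges = []
--     i = 0
--     while i < n:
--         if bits[i]:
--             j = i + 1
--             while j < n and bits[j]:
--                 j += 1
--             ranges.append((i + 1, j))
--             i = j + 1
--         else:
--             i += 1
--     return ranges
-- ===== Notes on version B (the rewrite author's own statement) =====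
-- stated objective: alternative
-- what changed: B materialises the explicit list of bit values and extracts runs with an index-jumping two-level scan (inner loop extends each run), instead of A's single fold over positions carrying Optional start/end state.
import Mathlib
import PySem

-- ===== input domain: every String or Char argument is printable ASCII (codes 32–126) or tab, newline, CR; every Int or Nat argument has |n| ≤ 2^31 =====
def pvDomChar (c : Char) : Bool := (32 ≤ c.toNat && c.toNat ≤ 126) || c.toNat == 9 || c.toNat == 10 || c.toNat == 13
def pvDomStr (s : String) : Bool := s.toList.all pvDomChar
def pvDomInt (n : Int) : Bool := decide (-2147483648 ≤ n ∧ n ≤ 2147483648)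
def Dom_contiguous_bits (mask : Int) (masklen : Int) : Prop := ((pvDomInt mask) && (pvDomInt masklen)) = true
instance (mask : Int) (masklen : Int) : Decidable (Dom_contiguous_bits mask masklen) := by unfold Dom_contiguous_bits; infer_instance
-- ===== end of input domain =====

-- B re-implements the scan over an explicit list of bit values with an index-jumping
-- two-level loop (run extension by inner loop) instead of A's single fold carrying
-- Optional start/end state; same cost, different structure (objective: alternative).

-- ===== PORT A =====
-- helper: Python truthiness of a variable that is None or an int
def pyTruthy (o : Option Int) : Bool :=
  match o with
  | none => false
  | some v => v != 0

def is_bit_on (number : Int) (bit : Int) (masklen : Int) : Bool :=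
  PySem.Int.band number ((1 : Int) <<< (masklen - bit).toNat) != 0

-- the body of A's 'for bit in range(1, masklen+1)' loop
def stepA (mask : Int) (masklen : Int)
    (st : List (Int × Int) × Option Int × Option Int) (bit : Int) :
    List (Int × Int) × Option Int × Option Int :=
  let ranges := st.1
  let start := st.2.1
  let end_ := st.2.2
  if is_bit_on mask bit masklen then
    if pyTruthy start then (ranges, start, some bit)
    else (ranges, some bit, some bit)
  else if pyTruthy end_ then (ranges ++ [(start.getD 0, end_.getD 0)], none, none)
  else (ranges, start, end_)

def contiguous_bits (mask : Int) (masklen : Int) : List (Int × Int) :=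
  let st := (PySem.List.pyRange 1 (masklen + 1) 1).foldl (stepA mask masklen) ([], none, none)
  if pyTruthy st.2.2 then st.1 ++ [(st.2.1.getD 0, st.2.2.getD 0)] else st.1

-- ===== PORT B =====
-- inner 'while j < n and bits[j]: j += 1' loop of B
def bitExt (bits : List Bool) (j : Nat) : Nat :=
  if decide (j < bits.length) && bits.getD j false then bitExt bits (j + 1) else j
termination_by bits.length - j
decreasing_by
  rename_i h; simp at h; omega

theorem bitExt_ge (bits : List Bool) (j : Nat) : j ≤ bitExt bits j := by
  fun_induction bitExt bits j <;> omega

-- outer 'while i < n' loop of B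
def bitScan (bits : List Bool) (i : Nat) (ranges : List (Int × Int)) : List (Int × Int) :=
  if i < bits.length then
    if bits.getD i false then
      let j := bitExt bits (i + 1)
      bitScan bits (j + 1) (ranges ++ [((i : Int) + 1, (j : Int))])
    else bitScan bits (i + 1) ranges
  else ranges
termination_by bits.length - i
decreasing_by
  · have := bitExt_ge bits (i + 1); omega
  · omega

def contiguous_bits_alt (mask : Int) (masklen : Int) : List (Int × Int) :=
  let bits := (PySem.List.pyRange 1 (masklen + 1) 1).map
    (fun p => PySem.Int.band mask ((1 : Int) <<< (masklen - p).toNat) != 0)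
  bitScan bits 0 []

-- ===== PRECONDITION & SPEC =====
def Spec_contiguous_bits (mask : Int) (masklen : Int) (out : List (Int × Int)) : Prop := out = contiguous_bits_alt mask masklen
instance (mask : Int) (masklen : Int) (out : List (Int × Int)) : Decidable (Spec_contiguous_bits mask masklen out) := by unfold Spec_contiguous_bits; infer_instance

-- ===== CLAIM (what is proved, stated in full; the proofs are below) =====
def Claim_equal_contiguous_bits : Prop := ∀ (mask : Int) (masklen : Int), Dom_contiguous_bits mask masklen → Spec_contiguous_bits mask masklen (contiguous_bits mask masklen)

-- ===== LEMMAS AND PROOFS =====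

-- A's result after the loop plus the trailing 'if end:' append
def postA (st : List (Int × Int) × Option Int × Option Int) : List (Int × Int) :=
  if pyTruthy st.2.2 then st.1 ++ [(st.2.1.getD 0, st.2.2.getD 0)] else st.1

theorem bitExt_of_false (bits : List Bool) (j : Nat)
    (h : ¬ (j < bits.length ∧ bits.getD j false = true)) : bitExt bits j = j := by
  unfold bitExt
  simp only [Bool.and_eq_true, decide_eq_true_eq]
  rw [if_neg h]

theorem bitExt_of_true (bits : List Bool) (j : Nat)
    (h1 : j < bits.length) (h2 : bits.getD j false = true) :
    bitExt bits j = bitExt bits (j + 1) := by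
  conv_lhs => unfold bitExt
  rw [if_pos (by simp only [Bool.and_eq_true, decide_eq_true_eq]; exact ⟨h1, h2⟩)]

theorem bitScan_of_ge (bits : List Bool) (i : Nat) (acc : List (Int × Int))
    (h : ¬ i < bits.length) : bitScan bits i acc = acc := by
  unfold bitScan; rw [if_neg h]

theorem bitScan_of_true (bits : List Bool) (i : Nat) (acc : List (Int × Int))
    (h1 : i < bits.length) (h2 : bits.getD i false = true) :
    bitScan bits i acc
      = bitScan bits (bitExt bits (i + 1) + 1) (acc ++ [((i : Int) + 1, (bitExt bits (i + 1) : Int))]) := by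
  conv_lhs => unfold bitScan
  rw [if_pos h1, if_pos h2]

theorem bitScan_of_false (bits : List Bool) (i : Nat) (acc : List (Int × Int))
    (h1 : i < bits.length) (h2 : bits.getD i false = false) :
    bitScan bits i acc = bitScan bits (i + 1) acc := by
  conv_lhs => unfold bitScan
  rw [if_pos h1, if_neg (by rw [h2]; exact Bool.false_ne_true)]

-- the bit list B materialises, as a function of the input
def bitsOf (mask : Int) (masklen : Int) : List Bool :=
  (PySem.List.pyRange 1 (masklen + 1) 1).map
    (fun p => PySem.Int.band mask ((1 : Int) <<< (masklen - p).toNat) != 0)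

theorem bitsOf_length (mask masklen : Int) : (bitsOf mask masklen).length = masklen.toNat := by
  unfold bitsOf
  rw [List.length_map, PySem.List.length_pyRange_one]
  omega

theorem bitsOf_getD (mask masklen : Int) (i : Nat) (h : i < (bitsOf mask masklen).length) :
    (bitsOf mask masklen).getD i false = is_bit_on mask ((i : Int) + 1) masklen := by
  rw [bitsOf_length] at h
  unfold bitsOf
  rw [← PySem.List.pyGetD_natCast]
  rw [PySem.List.pyGetD_map_pyRange_one _ 1 (masklen + 1) i false (by omega)]
  unfold is_bit_on
  norm_num [add_comm]

-- main invariant: A's loop from position i+1 in state (acc, none, none) computes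
-- bitScan from index i; in an open-run state (acc, some s, some i) it computes the
-- run completion B performs with bitExt.
theorem mainInv (mask masklen : Int) (d : Nat) : ∀ (i : Nat),
    i ≤ (bitsOf mask masklen).length → d = (bitsOf mask masklen).length - i →
    (∀ acc, postA ((PySem.List.pyRange ((i : Int) + 1) (masklen + 1) 1).foldl (stepA mask masklen) (acc, none, none))
        = bitScan (bitsOf mask masklen) i acc)
    ∧ (∀ acc (s : Int), s ≠ 0 → 1 ≤ i →
        postA ((PySem.List.pyRange ((i : Int) + 1) (masklen + 1) 1).foldl (stepA mask masklen) (acc, some s, some (i : Int)))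
        = bitScan (bitsOf mask masklen) (bitExt (bitsOf mask masklen) i + 1)
            (acc ++ [(s, (bitExt (bitsOf mask masklen) i : Int))])) := by
  induction d with
  | zero =>
    intro i hi hd
    have hin : i = (bitsOf mask masklen).length := by omega
    have hlen := bitsOf_length mask masklen
    have hempty : PySem.List.pyRange ((i : Int) + 1) (masklen + 1) 1 = [] := by
      apply PySem.List.pyRange_one_eq_nil; omega
    rw [hempty]
    constructor
    · intro acc
      rw [bitScan_of_ge _ _ _ (by omega)]
      simp [postA, pyTruthy]
    · intro acc s hs hi1
      have hext : bitExt (bitsOf mask masklen) i = i := by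
        apply bitExt_of_false; omega
      rw [bitScan_of_ge _ _ _ (by omega), hext]
      have hne : ((i : Int) != 0) = true := by simp; omega
      simp [postA, pyTruthy, hne]
  | succ d ih =>
    intro i hi hd
    have hlen := bitsOf_length mask masklen
    have hilt : i < (bitsOf mask masklen).length := by omega
    have hcons : PySem.List.pyRange ((i : Int) + 1) (masklen + 1) 1
        = ((i : Int) + 1) :: PySem.List.pyRange ((i : Int) + 1 + 1) (masklen + 1) 1 := by
      apply PySem.List.pyRange_one_cons; omega
    have hsucc : ((i : Int) + 1 + 1) = (((i + 1 : Nat) : Int) + 1) := by push_cast; ring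
    have ih' := ih (i + 1) (by omega) (by omega)
    have hget := bitsOf_getD mask masklen i hilt
    constructor
    · intro acc
      rw [hcons, List.foldl_cons]
      by_cases hbit : (bitsOf mask masklen).getD i false = true
      · have hon : is_bit_on mask ((i : Int) + 1) masklen = true := by rw [← hget, hbit]
        have hstep : stepA mask masklen (acc, none, none) ((i : Int) + 1)
            = (acc, some ((i : Int) + 1), some ((i : Int) + 1)) := by
          simp [stepA, hon, pyTruthy]
        rw [hstep]
        have hih := ih'.2 acc ((i : Int) + 1) (by omega) (by omega)
        push_cast at hih
        rw [hih]
        rw [bitScan_of_true _ _ _ hilt hbit]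
      · have hoff : is_bit_on mask ((i : Int) + 1) masklen = false := by
          rw [← hget]; simpa using hbit
        have hstep : stepA mask masklen (acc, none, none) ((i : Int) + 1)
            = (acc, none, none) := by
          simp [stepA, hoff, pyTruthy]
        rw [hstep]
        have hih := ih'.1 acc
        push_cast at hih
        rw [hih]
        rw [bitScan_of_false _ _ _ hilt (by simpa using hbit)]
    · intro acc s hs hi1
      rw [hcons, List.foldl_cons]
      by_cases hbit : (bitsOf mask masklen).getD i false = true
      · have hon : is_bit_on mask ((i : Int) + 1) masklen = true := by rw [← hget, hbit]
        have hstep : stepA mask masklen (acc, some s, some (i : Int)) ((i : Int) + 1)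
            = (acc, some s, some ((i : Int) + 1)) := by
          simp [stepA, hon, pyTruthy, hs]
        rw [hstep]
        have hih := ih'.2 acc s hs (by omega)
        push_cast at hih
        rw [hih]
        rw [bitExt_of_true _ _ hilt hbit]
      · have hbit' : (bitsOf mask masklen).getD i false = false := by simpa using hbit
        have hoff : is_bit_on mask ((i : Int) + 1) masklen = false := by
          rw [← hget, hbit']
        have hne : ((i : Int) != 0) = true := by simp; omega
        have hstep : stepA mask masklen (acc, some s, some (i : Int)) ((i : Int) + 1)
            = (acc ++ [(s, (i : Int))], none, none) := by
          simp [stepA, hoff, pyTruthy, hne]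
        rw [hstep]
        have hih := ih'.1 (acc ++ [(s, (i : Int))])
        push_cast at hih
        rw [hih]
        rw [bitExt_of_false _ _ (fun h => (by rw [hbit'] at h; exact Bool.false_ne_true h.2))]

-- ===== VERDICT (by name: the statement is the Claim_ definition above) =====
theorem contiguous_bits_spec : Claim_equal_contiguous_bits := by
  intro mask masklen _
  unfold Spec_contiguous_bits contiguous_bits contiguous_bits_alt
  have h := (mainInv mask masklen ((bitsOf mask masklen).length - 0) 0 (by omega) rfl).1 []
  simpa [postA, bitsOf] using h
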